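-- pv_equiv track=rewrite | github.com/tconcan/Instagram-Social-Network | presets.py | starfish_generation
-- ===== SOURCE A (Python) =====
-- def starfish_generation(arms, arm_size):
--
--     graph = []
--     node = 1
--     for arm in range(arms):
--         prev = 0
--         while(node <= arm * arm_size + arm_size):
--             graph.append([prev, node])
--             prev = node
--             node += 1
--     return graph
-- ===== SOURCE B (Python) =====
-- def starfish_generation(arms, arm_size):
--     if arms <= 0:
--         return []
--     # edge whose endpoint is node n: its predecessor is 0 exactly when n starts an arm,
--     # i.e. when (n-1) is a multiple of arm_size; otherwise it is n-1.
--     return [[0 if (n - 1) % arm_size == 0 else n - 1, n]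
--             for n in range(1, arms * arm_size + 1)]
-- ===== Notes on version B (the rewrite author's own statement) =====
-- stated objective: alternative
-- what changed: B drops A's nested per-arm loops and running prev/node counters entirely: it enumerates all edge endpoints 1..arms*arm_size in one flat range and computes each edge's predecessor by a divisibility formula ((n-1) % arm_size == 0 selects the hub 0).
import Mathlib
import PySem

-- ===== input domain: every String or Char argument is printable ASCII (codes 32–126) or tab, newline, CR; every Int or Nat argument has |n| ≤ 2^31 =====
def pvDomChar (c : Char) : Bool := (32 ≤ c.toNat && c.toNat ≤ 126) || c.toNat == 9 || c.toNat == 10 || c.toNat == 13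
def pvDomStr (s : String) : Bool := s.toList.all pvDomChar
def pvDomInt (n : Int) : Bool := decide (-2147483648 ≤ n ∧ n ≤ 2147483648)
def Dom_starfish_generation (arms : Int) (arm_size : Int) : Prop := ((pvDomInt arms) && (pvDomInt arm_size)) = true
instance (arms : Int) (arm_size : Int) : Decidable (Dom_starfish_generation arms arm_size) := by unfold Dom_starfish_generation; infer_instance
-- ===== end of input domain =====

-- B replaces A's nested per-arm loops and running prev/node counters by one flat pass over
-- all edge endpoints with a divisibility formula picking the hub; same return value everywhere.

-- ===== PORT A =====
-- inner while loop of A: appends [prev, node] while node <= bound, returns (graph, node)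
def sgInner (bound : Int) (g : List (List Int)) (prev node : Int) : List (List Int) × Int :=
  if node ≤ bound then
    sgInner bound (g ++ [[prev, node]]) node (node + 1)
  else (g, node)
termination_by (bound + 1 - node).toNat
decreasing_by omega

def starfish_generation (arms : Int) (arm_size : Int) : List (List Int) :=
  ((PySem.List.pyRange 0 arms 1).foldl
    (fun st arm => sgInner (arm * arm_size + arm_size) st.1 0 st.2) ([], 1)).1

-- ===== PORT B =====
def starfish_generation_alt (arms : Int) (arm_size : Int) : List (List Int) :=
  if arms ≤ 0 then []
  else (PySem.List.pyRange 1 (arms * arm_size + 1) 1).map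
    (fun n => [if PySem.Int.mod (n - 1) arm_size = 0 then 0 else n - 1, n])

-- ===== PRECONDITION & SPEC =====
def Spec_starfish_generation (arms : Int) (arm_size : Int) (out : List (List Int)) : Prop := out = starfish_generation_alt arms arm_size
instance (arms : Int) (arm_size : Int) (out : List (List Int)) : Decidable (Spec_starfish_generation arms arm_size out) := by unfold Spec_starfish_generation; infer_instance

-- ===== CLAIM =====
def Claim_equal_starfish_generation : Prop := ∀ (arms : Int) (arm_size : Int), Dom_starfish_generation arms arm_size → Spec_starfish_generation arms arm_size (starfish_generation arms arm_size)

-- ===== LEMMAS AND PROOFS =====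

-- B's per-edge formula
def edgeAt (s n : Int) : List Int :=
  [if PySem.Int.mod (n - 1) s = 0 then 0 else n - 1, n]

-- A's inner while loop, characterised as a map over the node range
lemma sgInner_map (bound : Int) : ∀ (k : Nat) (node : Int), (bound + 1 - node).toNat = k →
    node ≤ bound + 1 → ∀ (g : List (List Int)) (prev : Int),
    sgInner bound g prev node =
      (g ++ (PySem.List.pyRange node (bound + 1) 1).map
              (fun m => if m = node then [prev, m] else [m - 1, m]),
       bound + 1) := by
  intro k
  induction k with
  | zero =>
    intro node hk hle g prev
    have hnode : node = bound + 1 := by omega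
    subst hnode
    rw [sgInner, if_neg (by omega)]
    simp [PySem.List.pyRange_one_eq_nil (le_refl (bound + 1))]
  | succ k ih =>
    intro node hk hle g prev
    have h1 : node ≤ bound := by omega
    rw [sgInner, if_pos h1]
    rw [ih (node + 1) (by omega) (by omega)]
    have hmap : List.map (fun m => if m = node + 1 then [node, m] else [m - 1, m])
          (PySem.List.pyRange (node + 1) (bound + 1) 1)
        = List.map (fun m => if m = node then [prev, m] else [m - 1, m])
          (PySem.List.pyRange (node + 1) (bound + 1) 1) := by
      apply List.map_congr_left
      intro m hm
      rw [PySem.List.mem_pyRange_one] at hm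
      by_cases h : m = node + 1
      · subst h
        rw [if_pos rfl, if_neg (show node + 1 ≠ node by omega)]
        norm_num
      · rw [if_neg h, if_neg (show m ≠ node by omega)]
    rw [hmap]
    rw [PySem.List.pyRange_one_cons (show node < bound + 1 by omega), List.map_cons]
    rw [if_pos rfl]
    simp

lemma sgInner_noop (bound : Int) (g : List (List Int)) (prev node : Int) (h : bound < node) :
    sgInner bound g prev node = (g, node) := by
  rw [sgInner, if_neg (by omega)]

-- the per-arm block of A equals B's formula on that range (arm k, arm_size s > 0)
lemma arm_block_eq (s : Int) (hs : 0 < s) (k : Int) :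
    (PySem.List.pyRange (k * s + 1) (k * s + s + 1) 1).map
        (fun m => if m = k * s + 1 then [(0 : Int), m] else [m - 1, m]) =
      (PySem.List.pyRange (k * s + 1) (k * s + s + 1) 1).map (edgeAt s) := by
  apply List.map_congr_left
  intro m hm
  rw [PySem.List.mem_pyRange_one] at hm
  unfold edgeAt
  by_cases h : m = k * s + 1
  · subst h
    rw [if_pos rfl, if_pos]
    rw [PySem.Int.mod_eq_zero_iff_dvd]
    exact ⟨k, by ring⟩
  · rw [if_neg h, if_neg]
    rw [PySem.Int.mod_eq_zero_iff_dvd]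
    rintro ⟨q, hq⟩
    have h1 : k * s < m - 1 := by omega
    have h2 : m - 1 < (k + 1) * s := by nlinarith
    rw [hq] at h1 h2
    have hkq : k < q := by
      by_contra hc
      nlinarith
    nlinarith

-- fold invariant, positive arm_size: after n arms the graph is B's map over 1..n*s and node = n*s+1
lemma fold_pos (s : Int) (hs : 0 < s) : ∀ (n : Nat),
    (PySem.List.pyRange 0 (n : Int) 1).foldl
        (fun st arm => sgInner (arm * s + s) st.1 0 st.2) ([], 1) =
      ((PySem.List.pyRange 1 ((n : Int) * s + 1) 1).map (edgeAt s), (n : Int) * s + 1) := by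
  intro n
  induction n with
  | zero => simp [PySem.List.pyRange_one_eq_nil (le_refl (0:Int)),
      PySem.List.pyRange_one_eq_nil (le_refl (1:Int))]
  | succ n ih =>
    have hsplit : PySem.List.pyRange 0 ((n + 1 : Nat) : Int) 1 =
        PySem.List.pyRange 0 (n : Int) 1 ++ [(n : Int)] := by
      have := PySem.List.pyRange_one_succ_right (a := 0) (b := (n : Int)) (by positivity)
      rw [← this]; norm_num
    rw [hsplit, List.foldl_append, ih]
    simp only [List.foldl_cons, List.foldl_nil]
    have hn0 : (0 : Int) ≤ (n : Int) := by positivity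
    have hnode : (n : Int) * s + 1 ≤ ((n : Int) * s + s) + 1 := by nlinarith
    rw [sgInner_map ((n : Int) * s + s) ((n : Int) * s + s + 1 - ((n : Int) * s + 1)).toNat
        ((n : Int) * s + 1) rfl hnode]
    have hb : (n : Int) * s + s + 1 = ((n : Int) * s + 1) + s := by ring
    rw [arm_block_eq s hs (n : Int)]
    have hrange : PySem.List.pyRange 1 (((n + 1 : Nat) : Int) * s + 1) 1 =
        PySem.List.pyRange 1 ((n : Int) * s + 1) 1 ++
          PySem.List.pyRange ((n : Int) * s + 1) ((n : Int) * s + s + 1) 1 := by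
      have h1 : (1 : Int) ≤ (n : Int) * s + 1 := by nlinarith
      have h2 : (n : Int) * s + 1 ≤ (n : Int) * s + s + 1 := by omega
      have := PySem.List.pyRange_one_append 1 ((n : Int) * s + 1) ((n : Int) * s + s + 1) h1 h2
      rw [show ((n + 1 : Nat) : Int) * s + 1 = (n : Int) * s + s + 1 by push_cast; ring]
      exact this
    rw [hrange, List.map_append]
    simp only [Prod.mk.injEq]
    exact ⟨trivial, by push_cast; ring⟩

-- fold invariant, non-positive arm_size: no iteration of the while loop ever runs
lemma fold_nonpos (s : Int) (hnp : s ≤ 0) : ∀ (n : Nat),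
    (PySem.List.pyRange 0 (n : Int) 1).foldl
        (fun st arm => sgInner (arm * s + s) st.1 0 st.2) ([], 1) = ([], 1) := by
  intro n
  induction n with
  | zero => simp [PySem.List.pyRange_one_eq_nil (le_refl (0:Int))]
  | succ n ih =>
    have hsplit : PySem.List.pyRange 0 ((n + 1 : Nat) : Int) 1 =
        PySem.List.pyRange 0 (n : Int) 1 ++ [(n : Int)] := by
      have := PySem.List.pyRange_one_succ_right (a := 0) (b := (n : Int)) (by positivity)
      rw [← this]; norm_num
    rw [hsplit, List.foldl_append, ih]
    simp only [List.foldl_cons, List.foldl_nil]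
    exact sgInner_noop _ _ _ _ (by nlinarith [Int.natCast_nonneg n])

-- ===== VERDICT =====
theorem starfish_generation_spec : Claim_equal_starfish_generation := by
  intro arms arm_size _
  unfold Spec_starfish_generation starfish_generation starfish_generation_alt
  by_cases h : arms ≤ 0
  · rw [if_pos h, PySem.List.pyRange_one_eq_nil h]; rfl
  · rw [if_neg h]
    have harms : arms = (arms.toNat : Int) := by omega
    rw [harms]
    by_cases hs : arm_size ≤ 0
    · rw [fold_nonpos arm_size hs arms.toNat]
      have : (arms.toNat : Int) * arm_size + 1 ≤ 1 := by nlinarith [Int.natCast_nonneg arms.toNat]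
      rw [PySem.List.pyRange_one_eq_nil this]
      rfl
    · rw [fold_pos arm_size (by omega) arms.toNat]
      rfl
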